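-- pv_equiv track=rewrite | github.com/bio-phys/MDBenchmark | mdbenchmark/utils.py | format_interval_groups
-- ===== SOURCE A (Python) =====
-- def group_consecutives(values, step=1):
--     """Return list of consecutive lists of numbers from vals (number list).
--     This list hast to be at least ordered such that N+1 > N.
--     Adapted from code found on stack overflow.
--     Question Thread:
--     https://stackoverflow.com/questions/7352684/
--     Solved by:
--     https://stackoverflow.com/users/308066/dkamins
--     """
--
--     run = []
--     result = [run]
--     expected = None
--     for value in values:
--         if (value == expected) or (expected is None):
--             run.append(value)
--         else:
--             run = [value]
--             result.append(run)
--         expected = value + step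
--
--     return result
--
-- def format_interval_groups(nodes):
--     output = []
--     groups = group_consecutives(nodes)
--
--     for group in groups:
--         if len(group) == 1:
--             output.append(group[0])
--         else:
--             output.append(str(group[0]) + "-" + str(group[-1]))
--
--     return ", ".join(str(node) for node in output)
-- ===== SOURCE B (Python) =====
-- def format_interval_groups(nodes):
--     # Single pass: maintain current run's start and previous value; flush segments on break.
--     start = nodes[0]
--     prev = nodes[0]
--     parts = []
--     for value in nodes[1:]:
--         if value == prev + 1:
--             prev = value
--         else:
--             parts.append(str(start) if start == prev else str(start) + "-" + str(prev))
--             start = value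
--             prev = value
--     parts.append(str(start) if start == prev else str(start) + "-" + str(prev))
--     return ", ".join(parts)
-- ===== Notes on version B (the rewrite author's own statement) =====
-- stated objective: simpler
-- what changed: Replaces the two-pass group-then-format design (build a list of consecutive-run lists, then format each by its first/last element) with a single pass that only keeps the current run's start and previous value and flushes a formatted segment on each break.
import Mathlib
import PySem

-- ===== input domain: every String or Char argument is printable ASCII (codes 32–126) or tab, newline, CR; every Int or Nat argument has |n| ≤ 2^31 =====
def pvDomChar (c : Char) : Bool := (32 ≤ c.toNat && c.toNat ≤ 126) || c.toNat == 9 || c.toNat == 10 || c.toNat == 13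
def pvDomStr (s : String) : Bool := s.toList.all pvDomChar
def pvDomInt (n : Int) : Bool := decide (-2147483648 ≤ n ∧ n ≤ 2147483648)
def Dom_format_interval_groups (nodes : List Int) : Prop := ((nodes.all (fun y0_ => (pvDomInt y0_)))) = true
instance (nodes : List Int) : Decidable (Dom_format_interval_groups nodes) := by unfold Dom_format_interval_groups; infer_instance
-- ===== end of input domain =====

-- B replaces A's two-pass group-then-format design with a single pass keeping only the
-- current run's start and previous value (objective: simpler decomposition, same cost).


-- ===== PORT A =====
-- state = (finished runs, current run, expected); Python mutates `run` in place while it is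
-- already inside `result`, which is modelled by carrying the current run separately and
-- appending it at the end (result = done ++ [run]).
def gcStep (step : Int) (st : List (List Int) × List Int × Option Int) (value : Int) :
    List (List Int) × List Int × Option Int :=
  let (done, run, expected) := st
  if expected = some value ∨ expected = none then
    (done, run ++ [value], some (value + step))
  else
    (done ++ [run], [value], some (value + step))

def group_consecutives (values : List Int) (step : Int) : List (List Int) :=
  let st := values.foldl (gcStep step) ([], [], none)
  st.1 ++ [st.2.1]

-- one group's contribution to `output` (joined later via str(node)); group[0]/group[-1]
-- raise IndexError on the empty group — that happens only for nodes = [], excluded by Pre_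
-- (the `none` branches return "" only to make the port total there).
def fmtGroup (group : List Int) : String :=
  if group.length = 1 then
    match PySem.List.pyGet? group 0 with
    | some v => PySem.Int.toStr v
    | none => ""
  else
    match PySem.List.pyGet? group 0, PySem.List.pyGet? group (-1) with
    | some a, some b => PySem.Int.toStr a ++ "-" ++ PySem.Int.toStr b
    | _, _ => ""

def format_interval_groups (nodes : List Int) : String :=
  PySem.Str.join ", " ((group_consecutives nodes 1).map fmtGroup)

-- ===== PORT B =====
def segB (start prev : Int) : String :=
  if start = prev then PySem.Int.toStr start
  else PySem.Int.toStr start ++ "-" ++ PySem.Int.toStr prev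

def bLoop : List Int → List String → Int → Int → List String
  | [], parts, start, prev => parts ++ [segB start prev]
  | value :: rest, parts, start, prev =>
    if value = prev + 1 then bLoop rest parts start value
    else bLoop rest (parts ++ [segB start prev]) value value

-- nodes[0] raises IndexError on []: excluded by Pre_; "" there only makes the port total.
def format_interval_groups_alt (nodes : List Int) : String :=
  match nodes with
  | [] => ""
  | x :: rest => PySem.Str.join ", " (bLoop rest [] x x)

-- ===== PRECONDITION & SPEC =====
-- Pre_ excludes only [] : there A indexes group[0] of the empty run and raises IndexError
-- (B raises IndexError there too, on nodes[0]).
def Pre_format_interval_groups (nodes : List Int) : Prop := nodes ≠ []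
instance (nodes : List Int) : Decidable (Pre_format_interval_groups nodes) := by
  unfold Pre_format_interval_groups; infer_instance

def pvWitness_format_interval_groups : List Int := [1, 2, 3, 5]

def Spec_format_interval_groups (nodes : List Int) (out : String) : Prop :=
  out = format_interval_groups_alt nodes
instance (nodes : List Int) (out : String) : Decidable (Spec_format_interval_groups nodes out) := by
  unfold Spec_format_interval_groups; infer_instance

-- ===== CLAIM (what is proved, stated in full; the proofs are below) =====
def Claim_equal_format_interval_groups : Prop := ∀ (nodes : List Int), Dom_format_interval_groups nodes → Pre_format_interval_groups nodes → Spec_format_interval_groups nodes (format_interval_groups nodes)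

-- ===== LEMMAS AND PROOFS =====

-- a group with head `s`, last `p`, s ≤ p and (singleton ↔ s = p) formats as B's segment
lemma fmtGroup_eq_segB (run : List Int) (s p : Int)
    (hh : run.head? = some s) (hl : run.getLast? = some p)
    (hlen : run.length = 1 ↔ s = p) : fmtGroup run = segB s p := by
  cases run with
  | nil => simp at hh
  | cons a t =>
    cases t with
    | nil =>
      simp [List.head?, List.getLast?] at hh hl
      subst hh; subst hl
      simp [fmtGroup, segB]
    | cons b u =>
      have hne : s ≠ p := by
        intro h
        have := hlen.mpr h
        simp at this
      have hlen2 : (a :: b :: u).length ≠ 1 := by simp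
      simp only [fmtGroup, if_neg hlen2]
      rw [PySem.List.pyGet?_zero_cons, PySem.List.pyGet?_neg_one, hl]
      simp [List.head?] at hh
      subst hh
      simp [segB, hne]

-- core invariant: A's fold from (done, run, some (p+1)) formats to B's loop from
-- (done.map fmtGroup, s, p), whenever run has head s, last p, s ≤ p, singleton ↔ s = p
lemma loop_eq (rest : List Int) : ∀ (done : List (List Int)) (run : List Int) (s p : Int),
    run.head? = some s → run.getLast? = some p → s ≤ p → (run.length = 1 ↔ s = p) →
    (let st := rest.foldl (gcStep 1) (done, run, some (p + 1))
     (st.1 ++ [st.2.1]).map fmtGroup) = bLoop rest (done.map fmtGroup) s p := by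
  induction rest with
  | nil =>
    intro done run s p hh hl hsp hlen
    simp [bLoop, fmtGroup_eq_segB run s p hh hl hlen]
  | cons v rest ih =>
    intro done run s p hh hl hsp hlen
    by_cases hv : v = p + 1
    · subst hv
      have hstep : gcStep 1 (done, run, some (p + 1)) (p + 1) =
          (done, run ++ [p + 1], some (p + 1 + 1)) := by
        simp [gcStep]
      have hrun : run ≠ [] := by intro h; simp [h] at hh
      have hh' : (run ++ [p + 1]).head? = some s := by
        cases run with
        | nil => exact absurd rfl hrun
        | cons a t => simpa using hh
      have hl' : (run ++ [p + 1]).getLast? = some (p + 1) := by simp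
      have hlen' : (run ++ [p + 1]).length = 1 ↔ s = p + 1 := by
        constructor
        · intro h
          simp at h
          exact absurd h hrun
        · intro h
          exfalso
          omega
      have := ih done (run ++ [p + 1]) s (p + 1) hh' hl' (by omega) hlen'
      simp only [List.foldl_cons, hstep]
      rw [this]
      simp [bLoop]
    · have hstep : gcStep 1 (done, run, some (p + 1)) v = (done ++ [run], [v], some (v + 1)) := by
        simp [gcStep]
        intro h
        exact absurd h.symm hv
      have := ih (done ++ [run]) [v] v v (by simp [List.head?]) (by simp [List.getLast?])
        le_rfl (by simp)
      rw [List.foldl_cons, hstep, this]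
      simp [bLoop, hv, fmtGroup_eq_segB run s p hh hl hlen]

-- ===== VERDICT (by name: the statement is the Claim_ definition above) =====
theorem format_interval_groups_spec : Claim_equal_format_interval_groups := by
  intro nodes _ hpre
  cases nodes with
  | nil => exact absurd rfl hpre
  | cons x rest =>
    unfold Spec_format_interval_groups format_interval_groups format_interval_groups_alt
      group_consecutives
    have hfirst : gcStep 1 ([], [], none) x = ([], [x], some (x + 1)) := by simp [gcStep]
    rw [List.foldl_cons, hfirst]
    have := loop_eq rest [] [x] x x (by simp [List.head?]) (by simp [List.getLast?]) le_rfl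
      (by simp)
    simp only [List.map_nil] at this
    rw [this]
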